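-- pv_equiv track=rewrite | github.com/miklevin/pipulate | plugins/598_documentation.py | parse_botify_api_pages
-- ===== SOURCE A (Python) =====
-- def parse_botify_api_pages(content):
--     """Parse the botify_api.md content into pages separated by 80 hyphens"""
--     pages = []
--     current_page = []
--     lines = content.split('\n')
--
--     for line in lines:
--         if line.strip() == '-' * 80:
--             # Found a page separator
--             if current_page:
--                 pages.append('\n'.join(current_page))
--                 current_page = []
--         else:
--             current_page.append(line)
--
--     # Add the last page if there's content
--     if current_page:
--         pages.append('\n'.join(current_page))
--
--     return pages
-- ===== SOURCE B (Python) =====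
-- def parse_botify_api_pages(content):
--     """Parse the botify_api.md content into pages separated by 80 hyphens"""
--     sep = '-' * 80
--     lines = content.split('\n')
--     pages = []
--     i, n = 0, len(lines)
--     while i < n:
--         if lines[i].strip() == sep:
--             i += 1
--         else:
--             j = i + 1
--             while j < n and lines[j].strip() != sep:
--                 j += 1
--             pages.append('\n'.join(lines[i:j]))
--             i = j
--     return pages
-- ===== Notes on version B (the rewrite author's own statement) =====
-- stated objective: simpler
-- what changed: Replaced A's accumulator-and-flush loop (current_page list flushed into pages at each separator and once at the end) by a two-pointer run scan that skips separator lines and emits each maximal non-separator run directly, with no flush logic.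
import Mathlib
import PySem

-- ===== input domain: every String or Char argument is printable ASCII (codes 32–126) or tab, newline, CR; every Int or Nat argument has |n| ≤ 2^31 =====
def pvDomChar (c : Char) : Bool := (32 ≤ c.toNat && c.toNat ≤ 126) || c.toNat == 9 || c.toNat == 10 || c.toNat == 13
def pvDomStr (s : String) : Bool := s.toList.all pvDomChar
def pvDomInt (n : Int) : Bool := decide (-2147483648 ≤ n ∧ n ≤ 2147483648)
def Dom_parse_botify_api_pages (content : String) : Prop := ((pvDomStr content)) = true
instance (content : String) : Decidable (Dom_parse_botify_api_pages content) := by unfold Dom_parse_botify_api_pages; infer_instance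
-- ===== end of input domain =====

-- B replaces A's accumulator-and-flush loop by a two-pointer run scan (skip separator
-- lines, take each maximal non-separator run, join it); objective: simpler.

-- ===== PORT A =====
-- '-' * 80
def pvSep : String := String.ofList (List.replicate 80 '-')

-- the 'for line in lines' loop, state = (pages, current_page)
def pvALoop : List String → List String × List String → List String × List String
  | [], st => st
  | l :: ls, (pages, cur) =>
    if PySem.Str.strip l == pvSep then
      if cur ≠ [] then pvALoop ls (pages ++ [PySem.Str.join "\n" cur], [])
      else pvALoop ls (pages, cur)
    else pvALoop ls (pages, cur ++ [l])

def parse_botify_api_pages (content : String) : List String :=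
  -- content.split('\n'): sep is the nonempty literal "\n", so splitOn is the exact form
  let lines := (PySem.Chars.splitOn content.toList "\n".toList).map String.ofList
  let st := pvALoop lines ([], [])
  if st.2 ≠ [] then st.1 ++ [PySem.Str.join "\n" st.2] else st.1

-- ===== PORT B =====
def pvIsSep (l : String) : Bool := PySem.Str.strip l == pvSep

-- the outer while loop of B: skip separators, emit the maximal run starting at i
def pvBPages : List String → List String
  | [] => []
  | l :: ls =>
    if pvIsSep l then pvBPages ls
    else PySem.Str.join "\n" (l :: ls.takeWhile (fun x => !pvIsSep x)) ::
         pvBPages (ls.dropWhile (fun x => !pvIsSep x))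
termination_by ls => ls.length
decreasing_by
  · simp
  · exact Nat.lt_succ_of_le (List.length_dropWhile_le _ _)

def parse_botify_api_pages_alt (content : String) : List String :=
  pvBPages ((PySem.Chars.splitOn content.toList "\n".toList).map String.ofList)

-- ===== PRECONDITION & SPEC =====
def Spec_parse_botify_api_pages (content : String) (out : List String) : Prop := out = parse_botify_api_pages_alt content
instance (content : String) (out : List String) : Decidable (Spec_parse_botify_api_pages content out) := by unfold Spec_parse_botify_api_pages; infer_instance

-- ===== CLAIM (what is proved, stated in full; the proofs are below) =====
def Claim_equal_parse_botify_api_pages : Prop := ∀ (content : String), Dom_parse_botify_api_pages content → Spec_parse_botify_api_pages content (parse_botify_api_pages content)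

-- ===== LEMMAS AND PROOFS =====

-- reference recursion: pages produced by A from the remaining lines and the current page
def pvSpecP : List String → List String → List String
  | [], cur => if cur = [] then [] else [PySem.Str.join "\n" cur]
  | l :: ls, cur =>
    if pvIsSep l then (if cur = [] then [] else [PySem.Str.join "\n" cur]) ++ pvSpecP ls []
    else pvSpecP ls (cur ++ [l])

theorem pvALoop_spec (ls : List String) : ∀ (pages cur : List String),
    (if (pvALoop ls (pages, cur)).2 ≠ [] then
        (pvALoop ls (pages, cur)).1 ++ [PySem.Str.join "\n" (pvALoop ls (pages, cur)).2]
     else (pvALoop ls (pages, cur)).1) = pages ++ pvSpecP ls cur := by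
  induction ls with
  | nil =>
    intro pages cur
    by_cases h : cur = [] <;> simp [pvALoop, pvSpecP, h]
  | cons l ls ih =>
    intro pages cur
    by_cases hs : pvIsSep l
    · have hs' : (PySem.Str.strip l == pvSep) = true := hs
      by_cases hc : cur = []
      · have h1 : pvALoop (l :: ls) (pages, cur) = pvALoop ls (pages, cur) := by
          simp [pvALoop, hs', hc]
        rw [h1, ih]
        simp [pvSpecP, pvIsSep, hs', hc]
      · have h1 : pvALoop (l :: ls) (pages, cur)
            = pvALoop ls (pages ++ [PySem.Str.join "\n" cur], []) := by
          simp [pvALoop, hs', hc]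
        rw [h1, ih]
        simp [pvSpecP, pvIsSep, hs', hc]
    · have hs' : (PySem.Str.strip l == pvSep) = false := by simpa [pvIsSep] using hs
      have h1 : pvALoop (l :: ls) (pages, cur) = pvALoop ls (pages, cur ++ [l]) := by
        simp [pvALoop, hs']
      rw [h1, ih]
      simp [pvSpecP, pvIsSep, hs']

theorem pvSpecP_eq_pvBPages (ls : List String) :
    pvSpecP ls [] = pvBPages ls ∧
    ∀ cur : List String, cur ≠ [] →
      pvSpecP ls cur =
        PySem.Str.join "\n" (cur ++ ls.takeWhile (fun x => !pvIsSep x)) ::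
        pvBPages (ls.dropWhile (fun x => !pvIsSep x)) := by
  induction ls with
  | nil =>
    refine ⟨by simp [pvSpecP, pvBPages], ?_⟩
    intro cur hc
    simp [pvSpecP, pvBPages, hc]
  | cons l ls ih =>
    by_cases hs : pvIsSep l
    · refine ⟨?_, ?_⟩
      · simp [pvSpecP, pvBPages, hs, ih.1]
      · intro cur hc
        simp [pvSpecP, pvBPages, hs, hc, List.takeWhile, List.dropWhile, ih.1]
    · refine ⟨?_, ?_⟩
      · have h := ih.2 [l] (by simp)
        simp [pvSpecP, pvBPages, hs, h]
      · intro cur hc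
        have h := ih.2 (cur ++ [l]) (by simp)
        simp [pvSpecP, hs, h, List.takeWhile, List.dropWhile]

-- ===== VERDICT (by name: the statement is the Claim_ definition above) =====
theorem parse_botify_api_pages_spec : Claim_equal_parse_botify_api_pages := by
  intro content _
  unfold Spec_parse_botify_api_pages parse_botify_api_pages parse_botify_api_pages_alt
  rw [pvALoop_spec, ← (pvSpecP_eq_pvBPages _).1]
  simp
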